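-- pv_equiv track=rewrite | github.com/truonghoangduy/Freespeak | src/faceEmotionDetector/editEmotionsCsv.py | filter_data
-- ===== SOURCE A (Python) =====
-- import collections
--
-- def find_duplicates_map(data):
--     dups = collections.defaultdict(list)
--     for index, item in enumerate(data):
--         dups[item].append(index)
--     return dups
--
-- def filter_data(data, time):
--     dups = find_duplicates_map(data)
--     result = []
--     for index, item in enumerate(data):
--         repetitions = dups[item]
--         if index-1 in repetitions or index+1 in repetitions:
--             string = time[index] + "," + item
--             result.append(string)
--     return result
-- ===== SOURCE B (Python) =====
-- def filter_data(data, time):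
--     # Single pass: an index is kept iff its neighbour holds the same item.
--     n = len(data)
--     out = []
--     for i in range(n):
--         item = data[i]
--         if (i > 0 and data[i-1] == item) or (i + 1 < n and data[i+1] == item):
--             out.append(time[i] + "," + item)
--     return out
-- ===== Notes on version B (the rewrite author's own statement) =====
-- stated objective: faster
-- what changed: B drops A's duplicates-map (dict of index lists with linear membership scans) and does one pass comparing each element directly to its two neighbours.
import Mathlib
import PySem

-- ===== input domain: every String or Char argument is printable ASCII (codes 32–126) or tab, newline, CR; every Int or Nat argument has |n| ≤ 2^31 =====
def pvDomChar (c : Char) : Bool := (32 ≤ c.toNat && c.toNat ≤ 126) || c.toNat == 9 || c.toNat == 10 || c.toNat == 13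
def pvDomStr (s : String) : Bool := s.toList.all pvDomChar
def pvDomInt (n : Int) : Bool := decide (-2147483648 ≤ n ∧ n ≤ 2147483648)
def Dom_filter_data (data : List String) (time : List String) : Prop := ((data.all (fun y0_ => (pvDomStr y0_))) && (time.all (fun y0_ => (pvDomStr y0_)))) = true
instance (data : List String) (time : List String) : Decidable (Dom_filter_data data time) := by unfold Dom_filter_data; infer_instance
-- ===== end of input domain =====

-- ===== PORT A =====
-- B replaces A's duplicates-map (index lists scanned with 'in') by one pass comparing each
-- element to its two neighbours (objective: faster).
def find_duplicates_map (data : List String) : PySem.Dict String (List Int) :=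
  (PySem.List.enumerate data).foldl
    (fun d p => d.modify p.2 [] (fun l => l ++ [p.1])) PySem.Dict.empty

def filter_data (data : List String) (time : List String) : List String :=
  let dups := find_duplicates_map data
  (PySem.List.enumerate data).foldl
    (fun result p =>
      let reps := dups.getD p.2 []
      if reps.contains (p.1 - 1) || reps.contains (p.1 + 1) then
        result ++ [PySem.List.pyGetD time p.1 "" ++ "," ++ p.2]
      else result) []

def filter_data_alt (data : List String) (time : List String) : List String :=
  let n : Int := data.length
  (PySem.List.pyRange 0 n 1).foldl
    (fun out i =>
      let item := PySem.List.pyGetD data i ""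
      if (decide (0 < i) && (PySem.List.pyGetD data (i - 1) "" == item))
         || (decide (i + 1 < n) && (PySem.List.pyGetD data (i + 1) "" == item)) then
        out ++ [PySem.List.pyGetD time i "" ++ "," ++ item]
      else out) []


-- ===== PRECONDITION & SPEC =====
-- Pre_ excludes exactly the inputs on which Python A raises IndexError: some index whose
-- neighbour holds an equal element lies beyond len(time). (Python B raises there too.)
def Pre_filter_data (data : List String) (time : List String) : Prop :=
  ∀ i, i < data.length →
    ((0 < i ∧ data.getD (i - 1) "" = data.getD i "") ∨
     (i + 1 < data.length ∧ data.getD (i + 1) "" = data.getD i "")) →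
    i < time.length
instance (data : List String) (time : List String) : Decidable (Pre_filter_data data time) := by
  unfold Pre_filter_data; infer_instance
def pvWitness_filter_data : List String × List String := (["a", "a", "b"], ["1", "2", "3"])

def Spec_filter_data (data : List String) (time : List String) (out : List String) : Prop := out = filter_data_alt data time
instance (data : List String) (time : List String) (out : List String) : Decidable (Spec_filter_data data time out) := by unfold Spec_filter_data; infer_instance

-- ===== CLAIM (what is proved, stated in full; the proofs are below) =====
def Claim_equal_filter_data : Prop := ∀ (data : List String) (time : List String), Dom_filter_data data time → Pre_filter_data data time → Spec_filter_data data time (filter_data data time)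

-- ===== LEMMAS AND PROOFS =====

theorem mem_find_duplicates_map (data : List String) (c : String) (j : Int) :
    j ∈ (find_duplicates_map data).getD c [] ↔
      ∃ k : Nat, k < data.length ∧ (j : Int) = k ∧ data.getD k "" = c := by
  unfold find_duplicates_map
  have hfold : (List.foldl (fun (d : PySem.Dict String (List Int)) (p : Int × String) => d.modify p.2 [] fun l => l ++ [p.1]) PySem.Dict.empty (PySem.List.enumerate data))
      = List.foldl (fun d q => d.modify q.1 [] fun l => l ++ [q.2]) PySem.Dict.empty ((PySem.List.enumerate data).map Prod.swap) :=
    (List.foldl_map (f := Prod.swap)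
      (g := fun (d : PySem.Dict String (List Int)) q => d.modify q.1 [] fun l => l ++ [q.2])
      (l := PySem.List.enumerate data) (init := PySem.Dict.empty)).symm
  rw [hfold, PySem.Dict.getD_foldl_modify_append]
  simp only [PySem.Dict.getD_empty, List.nil_append, List.mem_map, List.mem_filter,
    PySem.List.mem_enumerate_iff]
  constructor
  · rintro ⟨q, ⟨⟨p, ⟨k, hk, rfl⟩, rfl⟩, hc⟩, rfl⟩
    refine ⟨k, hk, by simp, ?_⟩
    simp only [Prod.swap, beq_iff_eq] at hc
    simpa [List.getD_eq_getElem?_getD, hk] using hc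
  · rintro ⟨k, hk, rfl, hc⟩
    refine ⟨(data[k], 0 + (k : Int)), ⟨⟨(0 + (k : Int), data[k]), ⟨k, hk, rfl⟩, rfl⟩, ?_⟩, by simp⟩
    simp only [beq_iff_eq]
    simpa [List.getD_eq_getElem?_getD, hk] using hc

theorem contains_fdm (data : List String) (c : String) (j : Int) :
    ((find_duplicates_map data).getD c []).contains j =
      (decide (0 ≤ j) && decide (j < (data.length : Int)) && (PySem.List.pyGetD data j "" == c)) := by
  rw [Bool.eq_iff_iff]
  simp only [List.contains_iff_mem, Bool.and_eq_true, decide_eq_true_eq, beq_iff_eq,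
    mem_find_duplicates_map]
  constructor
  · rintro ⟨k, hk, rfl, hc⟩
    refine ⟨⟨by omega, by omega⟩, ?_⟩
    rw [PySem.List.pyGetD_natCast, hc]
  · rintro ⟨⟨h0, hn⟩, hc⟩
    refine ⟨j.toNat, by omega, by omega, ?_⟩
    have : j = ((j.toNat : Nat) : Int) := by omega
    rw [this, PySem.List.pyGetD_natCast] at hc
    exact hc

theorem filter_data_eq_alt (data time : List String) : filter_data data time = filter_data_alt data time := by
  unfold filter_data filter_data_alt
  simp only []
  rw [PySem.List.enumerate_eq_map_pyRange data ""]
  rw [List.foldl_map (f := fun j => (j, PySem.List.pyGetD data j ""))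
    (g := fun (result : List String) (p : Int × String) =>
      if ((find_duplicates_map data).getD p.2 []).contains (p.1 - 1)
         || ((find_duplicates_map data).getD p.2 []).contains (p.1 + 1) then
        result ++ [PySem.List.pyGetD time p.1 "" ++ "," ++ p.2]
      else result)]
  have hlen : PySem.List.len data = (data.length : Int) := by simp [PySem.List.len]
  rw [hlen]
  apply PySem.List.foldl_congr_mem
  intro acc j hj
  rw [PySem.List.mem_pyRange_one] at hj
  obtain ⟨h0, hn⟩ := hj
  simp only []
  have e1 : decide ((0:Int) ≤ j - 1) = decide ((0:Int) < j) := by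
    rw [decide_eq_decide]; omega
  have e2 : decide (j - 1 < (data.length : Int)) = true := by
    rw [decide_eq_true_eq]; omega
  have e3 : decide ((0:Int) ≤ j + 1) = true := by
    rw [decide_eq_true_eq]; omega
  rw [contains_fdm, contains_fdm, e1, e2, e3, Bool.and_true, Bool.true_and]

-- ===== VERDICT (by name: the statement is the Claim_ definition above) =====
theorem filter_data_spec : Claim_equal_filter_data := by
  intro data time _ _
  exact filter_data_eq_alt data time
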